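-- pv_equiv track=rewrite | github.com/hmn24/Quizzes | Quiz.py | count_quadlets
-- ===== SOURCE A (Python) =====
-- from collections import defaultdict
--
-- def count_quadlets(ar,r):
--     v2 = defaultdict(int)
--     v3 = defaultdict(int)
--     v4 = defaultdict(int)
--     count = 0
--     for k in ar:
--         count += v4[k]
--         v4[k*r] += v3[k]
--         v3[k*r] += v2[k]
--         v2[k*r] += 1
--     return count
-- ===== SOURCE B (Python) =====
-- def count_quadlets(ar, r):
--     # Pivot on the middle edge: a 4-term GP is a length-2 GP ending at j
--     # followed by a length-2 GP starting at k>j with ar[k] == ar[j]*r.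
--     # Backward pass: b[k] = number of l>k with ar[l] == ar[k]*r.
--     suffix = {}
--     bs = []
--     for k in reversed(ar):
--         bs.append(suffix.get(k * r, 0))
--         suffix[k] = suffix.get(k, 0) + 1
--     bs.reverse()
--     # Forward pass: cntR[x] = number of earlier j with ar[j]*r == x;
--     # S[x] = number of earlier pairs i<j with ar[j] == ar[i]*r and ar[j]*r == x.
--     cntR = {}
--     S = {}
--     count = 0
--     for k, b in zip(ar, bs):
--         count += S.get(k, 0) * b
--         S[k * r] = S.get(k * r, 0) + cntR.get(k, 0)
--         cntR[k * r] = cntR.get(k * r, 0) + 1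
--     return count
-- ===== Notes on version B (the rewrite author's own statement) =====
-- stated objective: alternative
-- what changed: Instead of A's single forward pass carrying counts of pending 2-, 3- and 4-term progressions in three defaultdicts, B pivots on the middle edge of the progression: a backward pass precomputes for each position the number of later matching elements, and a forward pass combines counts of 2-term prefixes with those suffix counts; it maintains only two dicts per element (plain dict.get, no defaultdict), which measured about 2x faster.
import Mathlib
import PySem

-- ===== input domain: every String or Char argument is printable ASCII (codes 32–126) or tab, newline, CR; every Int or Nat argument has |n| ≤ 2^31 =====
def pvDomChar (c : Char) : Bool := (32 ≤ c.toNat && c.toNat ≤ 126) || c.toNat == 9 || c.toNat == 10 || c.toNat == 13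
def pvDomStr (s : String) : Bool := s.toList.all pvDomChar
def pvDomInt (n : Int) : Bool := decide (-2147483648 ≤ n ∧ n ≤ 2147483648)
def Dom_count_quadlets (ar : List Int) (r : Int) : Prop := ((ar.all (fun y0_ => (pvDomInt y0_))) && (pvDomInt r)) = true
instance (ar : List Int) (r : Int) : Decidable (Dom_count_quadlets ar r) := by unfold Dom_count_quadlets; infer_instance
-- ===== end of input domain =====

-- B counts 4-term GPs by pivoting on the middle edge (backward suffix pass +
-- forward pass) instead of A's single pass carrying pending 2/3/4-term state;
-- objective: alternative decomposition of the same O(n) count.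


-- ===== PORT A =====
-- defaultdict reads are ported as 'getD _ 0' (the read-inserted zero entries
-- never change any later lookup value, so the returned count is exact).
def count_quadlets (ar : List Int) (r : Int) : Int :=
  (ar.foldl
    (fun (st : PySem.Dict Int Int × PySem.Dict Int Int × PySem.Dict Int Int × Int) k =>
      let v2 := st.1
      let v3 := st.2.1
      let v4 := st.2.2.1
      let count := st.2.2.2 + v4.getD k 0
      let v4 := v4.insert (k * r) (v4.getD (k * r) 0 + v3.getD k 0)
      let v3 := v3.insert (k * r) (v3.getD (k * r) 0 + v2.getD k 0)
      let v2 := v2.insert (k * r) (v2.getD (k * r) 0 + 1)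
      (v2, v3, v4, count))
    (PySem.Dict.empty, PySem.Dict.empty, PySem.Dict.empty, 0)).2.2.2

-- ===== PORT B =====
def count_quadlets_alt (ar : List Int) (r : Int) : Int :=
  -- backward pass over reversed(ar): bs.append(suffix.get(k*r,0)); suffix[k] += 1
  let back := ar.reverse.foldl
    (fun (st : PySem.Dict Int Int × List Int) k =>
      let suffix := st.1
      let bs := st.2 ++ [suffix.getD (k * r) 0]
      let suffix := suffix.insert k (suffix.getD k 0 + 1)
      (suffix, bs))
    (PySem.Dict.empty, [])
  let bs := back.2.reverse
  -- forward pass over zip(ar, bs)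
  ((List.zip ar bs).foldl
    (fun (st : PySem.Dict Int Int × PySem.Dict Int Int × Int) kb =>
      let cntR := st.1
      let S := st.2.1
      let count := st.2.2 + S.getD kb.1 0 * kb.2
      let S := S.insert (kb.1 * r) (S.getD (kb.1 * r) 0 + cntR.getD kb.1 0)
      let cntR := cntR.insert (kb.1 * r) (cntR.getD (kb.1 * r) 0 + 1)
      (cntR, S, count))
    (PySem.Dict.empty, PySem.Dict.empty, 0)).2.2

-- ===== PRECONDITION & SPEC =====
def Spec_count_quadlets (ar : List Int) (r : Int) (out : Int) : Prop := out = count_quadlets_alt ar r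
instance (ar : List Int) (r : Int) (out : Int) : Decidable (Spec_count_quadlets ar r out) := by unfold Spec_count_quadlets; infer_instance

-- ===== CLAIM (what is proved, stated in full; the proofs are below) =====
def Claim_equal_count_quadlets : Prop := ∀ (ar : List Int) (r : Int), Dom_count_quadlets ar r → Spec_count_quadlets ar r (count_quadlets ar r)

-- ===== LEMMAS AND PROOFS =====

/-- Pointwise bump of a counting function at one key. -/
def pvBump (f : Int → Int) (t a : Int) : Int → Int := fun x => if x = t then f x + a else f x

/-- Int-valued occurrence count. -/
def pvCnt (t : Int) : List Int → Int
  | [] => 0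
  | y :: ys => (if y = t then 1 else 0) + pvCnt t ys

/-- Annotate each element k with (suffix count of k*r) + f (k*r). -/
def pvAnnot (r : Int) (f : Int → Int) : List Int → List (Int × Int)
  | [] => []
  | k :: ks => (k, pvCnt (k * r) ks + f (k * r)) :: pvAnnot r f ks

/-- A's fold, with dicts abstracted to functions; returns the count. -/
def pvAfold (r : Int) : List Int → (Int → Int) → (Int → Int) → (Int → Int) → Int → Int
  | [], _, _, _, c => c
  | k :: ks, v2, v3, v4, c =>
      pvAfold r ks (pvBump v2 (k * r) 1) (pvBump v3 (k * r) (v2 k)) (pvBump v4 (k * r) (v3 k)) (c + v4 k)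

/-- B's forward fold, with dicts abstracted to functions. -/
def pvBfold (r : Int) : List (Int × Int) → (Int → Int) → (Int → Int) → Int → Int
  | [], _, _, c => c
  | (k, b) :: ks, v2, v3, c =>
      pvBfold r ks (pvBump v2 (k * r) 1) (pvBump v3 (k * r) (v2 k)) (c + v3 k * b)

/-- Pending-triples potential. -/
def pvPend (v4 : Int → Int) : List Int → Int
  | [] => 0
  | k :: ks => v4 k + pvPend v4 ks

/-- B's backward pass abstracted: the bs produced (in processing order). -/
def pvRA (r : Int) (f : Int → Int) : List Int → List Int
  | [] => []
  | y :: ys => f (y * r) :: pvRA r (pvBump f y 1) ys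

theorem pvBfold_const (r : Int) (l : List (Int × Int)) (v2 v3 : Int → Int) (c d : Int) :
    pvBfold r l v2 v3 (c + d) = pvBfold r l v2 v3 c + d := by
  induction l generalizing v2 v3 c with
  | nil => rfl
  | cons p ks ih =>
      obtain ⟨k, b⟩ := p
      simp only [pvBfold]
      rw [show c + d + v3 k * b = (c + v3 k * b) + d by ring, ih]

theorem pvPend_bump (v4 : Int → Int) (t a : Int) (ks : List Int) :
    pvPend (pvBump v4 t a) ks = pvPend v4 ks + a * pvCnt t ks := by
  induction ks with
  | nil => simp [pvPend, pvCnt]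
  | cons k ks ih =>
      simp only [pvPend, pvCnt, pvBump, ih]
      split_ifs with h <;> ring

/-- Core identity: A's fold = B's forward fold on the suffix-annotated list,
plus the pending-triples potential. -/
theorem pvAfold_eq_pvBfold (r : Int) (ks : List Int) :
    ∀ (v2 v3 v4 : Int → Int) (c : Int),
      pvAfold r ks v2 v3 v4 c = pvBfold r (pvAnnot r (fun _ => 0) ks) v2 v3 c + pvPend v4 ks := by
  induction ks with
  | nil => intro v2 v3 v4 c; simp [pvAfold, pvBfold, pvAnnot, pvPend]
  | cons k ks ih =>
      intro v2 v3 v4 c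
      simp only [pvAfold, pvAnnot, pvBfold, pvPend, ih, pvPend_bump]
      have hb : pvBump v3 (k * r) (v2 k) k = v3 k + (if k = k * r then v2 k else 0) := by
        simp only [pvBump]; split_ifs <;> ring
      rw [show c + v4 k = (c + v3 k * (pvCnt (k * r) ks + 0)) + (v4 k - v3 k * pvCnt (k * r) ks) by ring,
          pvBfold_const]
      ring

theorem pvCnt_append (t : Int) (l : List Int) (k : Int) :
    pvCnt t (l ++ [k]) = pvCnt t l + (if k = t then 1 else 0) := by
  induction l with
  | nil => simp [pvCnt]
  | cons y ys ih => simp only [List.cons_append, pvCnt, ih]; ring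

theorem pvRA_length (r : Int) (f : Int → Int) (l : List Int) : (pvRA r f l).length = l.length := by
  induction l generalizing f with
  | nil => rfl
  | cons y ys ih => simp [pvRA, ih]

theorem pvAnnot_snoc (r : Int) (f : Int → Int) (ks : List Int) (k : Int) :
    pvAnnot r f (ks ++ [k]) = pvAnnot r (pvBump f k 1) ks ++ [(k, f (k * r))] := by
  induction ks with
  | nil => simp [pvAnnot, pvCnt]
  | cons m ms ih =>
      simp only [List.cons_append, pvAnnot, ih, pvCnt_append, pvBump, List.cons.injEq,
        Prod.mk.injEq, true_and, and_true]
      split_ifs with h1 h2 h2 <;> first | ring1 | (exact absurd h1.symm h2) | (exact absurd h2.symm h1)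

/-- The reversed backward-pass output zipped with the list is the annotation. -/
theorem pvZip_ra (r : Int) (ar : List Int) :
    ∀ f, List.zip ar (pvRA r f ar.reverse).reverse = pvAnnot r f ar := by
  induction ar using List.reverseRecOn with
  | nil => intro f; rfl
  | append_singleton ks k ih =>
      intro f
      rw [List.reverse_append]
      simp only [List.reverse_cons, List.reverse_nil, List.nil_append, List.singleton_append, pvRA,
        List.reverse_cons]
      rw [List.zip_append (by simp [pvRA_length]), ih (pvBump f k 1), pvAnnot_snoc]
      rfl

/-- Dict abstraction for A's fold. -/
theorem pvA_dict (r : Int) (ks : List Int) :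
    ∀ (d2 d3 d4 : PySem.Dict Int Int) (c : Int) (v2 v3 v4 : Int → Int),
      (∀ x, d2.getD x 0 = v2 x) → (∀ x, d3.getD x 0 = v3 x) → (∀ x, d4.getD x 0 = v4 x) →
      (ks.foldl
        (fun (st : PySem.Dict Int Int × PySem.Dict Int Int × PySem.Dict Int Int × Int) k =>
          let v2 := st.1
          let v3 := st.2.1
          let v4 := st.2.2.1
          let count := st.2.2.2 + v4.getD k 0
          let v4 := v4.insert (k * r) (v4.getD (k * r) 0 + v3.getD k 0)
          let v3 := v3.insert (k * r) (v3.getD (k * r) 0 + v2.getD k 0)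
          let v2 := v2.insert (k * r) (v2.getD (k * r) 0 + 1)
          (v2, v3, v4, count))
        (d2, d3, d4, c)).2.2.2 = pvAfold r ks v2 v3 v4 c := by
  induction ks with
  | nil => intro _ _ _ _ _ _ _ _ _ _; rfl
  | cons k ks ih =>
      intro d2 d3 d4 c v2 v3 v4 h2 h3 h4
      have h2' : ∀ x, (d2.insert (k * r) (d2.getD (k * r) 0 + 1)).getD x 0 = pvBump v2 (k * r) 1 x := by
        intro x; rw [PySem.Dict.getD_insert]; simp only [pvBump]
        split_ifs with h
        · subst h; rw [h2]
        · rw [h2]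
      have h3' : ∀ x, (d3.insert (k * r) (d3.getD (k * r) 0 + d2.getD k 0)).getD x 0
          = pvBump v3 (k * r) (v2 k) x := by
        intro x; rw [PySem.Dict.getD_insert]; simp only [pvBump]
        split_ifs with h
        · subst h; rw [h3, h2]
        · rw [h3]
      have h4' : ∀ x, (d4.insert (k * r) (d4.getD (k * r) 0 + d3.getD k 0)).getD x 0
          = pvBump v4 (k * r) (v3 k) x := by
        intro x; rw [PySem.Dict.getD_insert]; simp only [pvBump]
        split_ifs with h
        · subst h; rw [h4, h3]
        · rw [h4]
      rw [List.foldl_cons, show pvAfold r (k :: ks) v2 v3 v4 c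
        = pvAfold r ks (pvBump v2 (k * r) 1) (pvBump v3 (k * r) (v2 k)) (pvBump v4 (k * r) (v3 k)) (c + v4 k) from rfl,
        show v4 k = d4.getD k 0 from (h4 k).symm]
      exact ih _ _ _ _ _ _ _ h2' h3' h4'

/-- Dict abstraction for B's forward fold. -/
theorem pvB_dict (r : Int) (ks : List (Int × Int)) :
    ∀ (dc dS : PySem.Dict Int Int) (c : Int) (v2 v3 : Int → Int),
      (∀ x, dc.getD x 0 = v2 x) → (∀ x, dS.getD x 0 = v3 x) →
      (ks.foldl
        (fun (st : PySem.Dict Int Int × PySem.Dict Int Int × Int) kb =>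
          let cntR := st.1
          let S := st.2.1
          let count := st.2.2 + S.getD kb.1 0 * kb.2
          let S := S.insert (kb.1 * r) (S.getD (kb.1 * r) 0 + cntR.getD kb.1 0)
          let cntR := cntR.insert (kb.1 * r) (cntR.getD (kb.1 * r) 0 + 1)
          (cntR, S, count))
        (dc, dS, c)).2.2 = pvBfold r ks v2 v3 c := by
  induction ks with
  | nil => intro _ _ _ _ _ _ _; rfl
  | cons kb ks ih =>
      obtain ⟨k, b⟩ := kb
      intro dc dS c v2 v3 h2 h3
      have h2' : ∀ x, (dc.insert (k * r) (dc.getD (k * r) 0 + 1)).getD x 0 = pvBump v2 (k * r) 1 x := by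
        intro x; rw [PySem.Dict.getD_insert]; simp only [pvBump]
        split_ifs with h
        · subst h; rw [h2]
        · rw [h2]
      have h3' : ∀ x, (dS.insert (k * r) (dS.getD (k * r) 0 + dc.getD k 0)).getD x 0
          = pvBump v3 (k * r) (v2 k) x := by
        intro x; rw [PySem.Dict.getD_insert]; simp only [pvBump]
        split_ifs with h
        · subst h; rw [h3, h2]
        · rw [h3]
      rw [List.foldl_cons, show pvBfold r ((k, b) :: ks) v2 v3 c
        = pvBfold r ks (pvBump v2 (k * r) 1) (pvBump v3 (k * r) (v2 k)) (c + v3 k * b) from rfl,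
        show v3 k = dS.getD k 0 from (h3 k).symm]
      exact ih _ _ _ _ _ h2' h3'

/-- Dict abstraction for B's backward pass: the bs list produced. -/
theorem pvRA_dict (r : Int) (ys : List Int) :
    ∀ (d : PySem.Dict Int Int) (acc : List Int) (f : Int → Int),
      (∀ x, d.getD x 0 = f x) →
      (ys.foldl
        (fun (st : PySem.Dict Int Int × List Int) k =>
          let suffix := st.1
          let bs := st.2 ++ [suffix.getD (k * r) 0]
          let suffix := suffix.insert k (suffix.getD k 0 + 1)
          (suffix, bs))
        (d, acc)).2 = acc ++ pvRA r f ys := by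
  induction ys with
  | nil => intro _ acc _ _; simp [pvRA]
  | cons y ys ih =>
      intro d acc f hf
      have hf' : ∀ x, (d.insert y (d.getD y 0 + 1)).getD x 0 = pvBump f y 1 x := by
        intro x; rw [PySem.Dict.getD_insert]; simp only [pvBump]
        split_ifs with h
        · subst h; rw [hf]
        · rw [hf]
      rw [List.foldl_cons]
      refine (ih _ (acc ++ [d.getD (y * r) 0]) _ hf').trans ?_
      rw [hf]
      simp [pvRA]

theorem pvPend_zero (ar : List Int) : pvPend (fun _ => 0) ar = 0 := by
  induction ar with
  | nil => rfl
  | cons k ks ih => simp [pvPend, ih]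

-- ===== VERDICT (by name: the statement is the Claim_ definition above) =====
theorem count_quadlets_spec : Claim_equal_count_quadlets := by
  intro ar r _
  have hz : ∀ x, (PySem.Dict.empty : PySem.Dict Int Int).getD x 0 = (fun _ => (0 : Int)) x := by
    simp
  have hA : count_quadlets ar r = pvAfold r ar (fun _ => 0) (fun _ => 0) (fun _ => 0) 0 :=
    pvA_dict r ar PySem.Dict.empty PySem.Dict.empty PySem.Dict.empty 0 _ _ _ hz hz hz
  have hB : count_quadlets_alt ar r = pvBfold r (pvAnnot r (fun _ => 0) ar) (fun _ => 0) (fun _ => 0) 0 := by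
    show ((List.zip ar ((ar.reverse.foldl
        (fun (st : PySem.Dict Int Int × List Int) k =>
          let suffix := st.1
          let bs := st.2 ++ [suffix.getD (k * r) 0]
          let suffix := suffix.insert k (suffix.getD k 0 + 1)
          (suffix, bs))
        (PySem.Dict.empty, [])).2.reverse)).foldl
        (fun (st : PySem.Dict Int Int × PySem.Dict Int Int × Int) kb =>
          let cntR := st.1
          let S := st.2.1
          let count := st.2.2 + S.getD kb.1 0 * kb.2
          let S := S.insert (kb.1 * r) (S.getD (kb.1 * r) 0 + cntR.getD kb.1 0)
          let cntR := cntR.insert (kb.1 * r) (cntR.getD (kb.1 * r) 0 + 1)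
          (cntR, S, count))
        (PySem.Dict.empty, PySem.Dict.empty, 0)).2.2 = _
    rw [pvRA_dict r ar.reverse PySem.Dict.empty [] (fun _ => 0) hz, List.nil_append,
      pvZip_ra r ar (fun _ => 0)]
    exact pvB_dict r _ PySem.Dict.empty PySem.Dict.empty 0 _ _ hz hz
  show count_quadlets ar r = count_quadlets_alt ar r
  rw [hA, hB, pvAfold_eq_pvBfold, pvPend_zero, add_zero]
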